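-- pv_equiv track=rewrite | github.com/sglee487/Coding-test | 기타/2020년 하반기 SW개발 신입 LINER 공개채용 코딩테스트/1.py | solution
-- ===== SOURCE A (Python) =====
-- from collections import defaultdict
--
-- def solution(boxes):
--     boxnum = len(boxes)
--     prodic = defaultdict(int)
--
--     for p1,p2 in boxes:
--         prodic[p1] += 1
--         prodic[p2] += 1
--
--     nowboxnum = 0
--     for h in prodic.values():
--         nowboxnum += h // 2
--
--     return boxnum-nowboxnum
-- ===== SOURCE B (Python) =====
-- def solution(boxes):
--     odd = set()
--     for p1, p2 in boxes:
--         for p in (p1, p2):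
--             if p in odd:
--                 odd.discard(p)
--             else:
--                 odd.add(p)
--     return len(odd) // 2
-- ===== Notes on version B (the rewrite author's own statement) =====
-- stated objective: simpler
-- what changed: Replaces the counting dict plus a second summation loop over its values with a single parity-toggle set (add/discard each product), returning half the number of odd-count products; boxnum and the value-summation loop are gone.
import Mathlib
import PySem

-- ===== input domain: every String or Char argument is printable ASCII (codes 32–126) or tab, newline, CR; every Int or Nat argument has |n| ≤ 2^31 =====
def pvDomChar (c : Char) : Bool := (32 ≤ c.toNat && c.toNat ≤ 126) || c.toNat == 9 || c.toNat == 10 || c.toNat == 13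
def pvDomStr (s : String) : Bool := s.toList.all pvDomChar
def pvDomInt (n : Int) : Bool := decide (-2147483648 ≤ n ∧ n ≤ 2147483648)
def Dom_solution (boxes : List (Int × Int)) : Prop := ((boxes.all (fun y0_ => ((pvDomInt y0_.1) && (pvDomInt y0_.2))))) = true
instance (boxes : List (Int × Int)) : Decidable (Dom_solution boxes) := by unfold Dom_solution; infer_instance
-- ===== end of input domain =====

-- B replaces the counting dict and the value-summation loop by a single parity-toggle set,
-- returning half the number of products seen an odd number of times (objective: simpler).

-- ===== PORT A =====
def solution (boxes : List (Int × Int)) : Int :=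
  let boxnum : Int := boxes.length
  let prodic : PySem.Dict Int Int :=
    boxes.foldl (fun d p => ((d.modify p.1 0 (· + 1)).modify p.2 0 (· + 1))) PySem.Dict.empty
  let nowboxnum : Int := prodic.values.foldl (fun acc h => acc + PySem.Int.floordiv h 2) 0
  boxnum - nowboxnum

-- ===== PORT B =====
-- the inner 'for p in (p1, p2)' toggle
def pvToggle (s : PySem.Set Int) (p : Int) : PySem.Set Int :=
  if s.contains p then s.discard p else s.add p

def solution_alt (boxes : List (Int × Int)) : Int :=
  let odd : PySem.Set Int := boxes.foldl (fun s p => pvToggle (pvToggle s p.1) p.2) PySem.Set.empty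
  PySem.Int.floordiv (PySem.Set.len odd) 2

-- ===== PRECONDITION & SPEC =====
def Spec_solution (boxes : List (Int × Int)) (out : Int) : Prop := out = solution_alt boxes
instance (boxes : List (Int × Int)) (out : Int) : Decidable (Spec_solution boxes out) := by unfold Spec_solution; infer_instance

-- ===== CLAIM (what is proved, stated in full; the proofs are below) =====
def Claim_equal_solution : Prop := ∀ (boxes : List (Int × Int)), Dom_solution boxes → Spec_solution boxes (solution boxes)

-- ===== LEMMAS AND PROOFS =====

-- the product stream both programs process, element by element
def pvProds (boxes : List (Int × Int)) : List Int := boxes.flatMap (fun p => [p.1, p.2])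

lemma dict_fold_flat (boxes : List (Int × Int)) (d : PySem.Dict Int Int) :
    boxes.foldl (fun d p => ((d.modify p.1 0 (· + 1)).modify p.2 0 (· + 1))) d
      = (pvProds boxes).foldl (fun d x => d.modify x 0 (· + 1)) d := by
  induction boxes generalizing d with
  | nil => rfl
  | cons p t ih => simp [pvProds, List.foldl] at ih ⊢; exact ih _

lemma set_fold_flat (boxes : List (Int × Int)) (s : PySem.Set Int) :
    boxes.foldl (fun s p => pvToggle (pvToggle s p.1) p.2) s
      = (pvProds boxes).foldl pvToggle s := by
  induction boxes generalizing s with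
  | nil => rfl
  | cons p t ih => simp [pvProds, List.foldl] at ih ⊢; exact ih _

lemma nodup_pvToggle (s : PySem.Set Int) (x : Int) (h : s.Nodup) : (pvToggle s x).Nodup := by
  unfold pvToggle; split
  · exact PySem.Set.nodup_discard s x h
  · exact PySem.Set.nodup_add s x h

lemma mem_pvToggle (s : PySem.Set Int) (x v : Int) :
    v ∈ pvToggle s x ↔ Xor' (v ∈ s) (v = x) := by
  unfold pvToggle Xor'
  split <;> rename_i hc <;> rw [PySem.Set.contains_iff] at hc
  · rw [PySem.Set.mem_discard]
    constructor
    · rintro ⟨hv, hne⟩; exact Or.inl ⟨hv, hne⟩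
    · rintro (⟨hv, hne⟩ | ⟨rfl, hns⟩)
      · exact ⟨hv, hne⟩
      · exact absurd hc hns
  · rw [PySem.Set.mem_add]
    constructor
    · rintro (hv | rfl)
      · exact Or.inl ⟨hv, fun e => hc (e ▸ hv)⟩
      · exact Or.inr ⟨rfl, hc⟩
    · rintro (⟨hv, _⟩ | ⟨rfl, _⟩)
      · exact Or.inl hv
      · exact Or.inr rfl

lemma nodup_fold_toggle (xs : List Int) (s : PySem.Set Int) (h : s.Nodup) :
    (xs.foldl pvToggle s).Nodup := by
  induction xs generalizing s with
  | nil => exact h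
  | cons x t ih => exact ih _ (nodup_pvToggle s x h)

lemma mem_fold_toggle (xs : List Int) (s : PySem.Set Int) (v : Int) :
    v ∈ xs.foldl pvToggle s ↔ Xor' (v ∈ s) (Odd (xs.count v)) := by
  induction xs generalizing s with
  | nil => simp [Xor']
  | cons x t ih =>
    rw [List.foldl_cons, ih, mem_pvToggle]
    by_cases hvx : v = x
    · subst hvx
      simp only [List.count_cons_self, Nat.odd_add_one]
      unfold Xor'; tauto
    · have hxv : ¬ (x = v) := fun h => hvx h.symm
      simp only [List.count_cons, beq_iff_eq, if_neg hxv, Nat.add_zero]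
      unfold Xor'; tauto

-- the distinct products, odd-count ones marked
def pvOddList (xs : List Int) : List Int :=
  (PySem.List.dedup xs).filter (fun v => xs.count v % 2 == 1)

lemma fold_toggle_perm (xs : List Int) :
    (xs.foldl pvToggle PySem.Set.empty).Perm (pvOddList xs) := by
  show (xs.foldl pvToggle ([] : PySem.Set Int)).Perm (pvOddList xs)
  unfold pvOddList
  rw [List.perm_ext_iff_of_nodup (nodup_fold_toggle xs _ List.nodup_nil)
      (List.Nodup.filter _ (by rw [PySem.List.dedup_eq_ofList]; exact PySem.Set.nodup_ofList xs))]
  intro v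
  rw [mem_fold_toggle, List.mem_filter, PySem.List.dedup_eq_ofList, PySem.Set.mem_ofList]
  constructor
  · rintro (⟨h, _⟩ | ⟨hodd, _⟩)
    · cases h
    · rw [Nat.odd_iff] at hodd
      exact ⟨List.count_pos_iff.mp (by omega), by simp [hodd]⟩
  · rintro ⟨_, hodd⟩
    simp only [beq_iff_eq] at hodd
    exact Or.inr ⟨Nat.odd_iff.mpr hodd, by simp⟩

-- Σ_{k ∈ D} count k = |xs| for any nodup D with the same members as xs
lemma sum_count_over_nodup (xs D : List Int) (hnd : D.Nodup)
    (hmem : ∀ v, v ∈ D ↔ v ∈ xs) :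
    (D.map (fun k => xs.count k)).sum = xs.length := by
  have hperm : D.Perm xs.dedup := by
    rw [List.perm_ext_iff_of_nodup hnd (List.nodup_dedup xs)]
    intro a; rw [hmem, List.mem_dedup]
  calc (D.map (fun k => xs.count k)).sum
      = (xs.dedup.map (fun k => xs.count k)).sum := (hperm.map _).sum_eq
    _ = xs.length := List.sum_map_count_dedup_eq_length xs

-- Σ of 0/1-valued terms = countP
lemma sum_mod_two_eq_countP (D : List Int) (f : Int → Nat) :
    (D.map (fun k => f k % 2)).sum = D.countP (fun k => f k % 2 == 1) := by
  induction D with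
  | nil => rfl
  | cons x t ih =>
    rw [List.map_cons, List.sum_cons, ih, List.countP_cons]
    by_cases h : f x % 2 = 1 <;> simp [h] <;> omega

-- the central arithmetic identity, stated over the flattened product list
lemma main_identity (boxes : List (Int × Int)) :
    solution boxes = solution_alt boxes := by
  unfold solution solution_alt
  dsimp only
  rw [dict_fold_flat, set_fold_flat, ← PySem.Dict.counter_eq_foldl]
  set xs := pvProds boxes with hxs
  have hlen2 : xs.length = 2 * boxes.length := by
    rw [hxs]; unfold pvProds
    induction boxes with
    | nil => rfl
    | cons p t ih => simp [List.flatMap_cons] at ih ⊢; omega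
  -- values of the counter
  rw [PySem.Dict.values_eq_map_keys _ (PySem.Dict.nodup_keys_counter xs) 0]
  have hkeys := PySem.Dict.keys_counter xs
  rw [PySem.List.foldl_add, List.map_map]
  have hgetD : ∀ k, (PySem.Dict.counter xs).getD k 0 = (xs.count k : Int) :=
    fun k => PySem.Dict.getD_counter xs k
  have hmapeq : (PySem.Dict.counter xs).keys.map
        ((fun h => PySem.Int.floordiv h 2) ∘ fun k => (PySem.Dict.counter xs).getD k 0)
      = (PySem.Dict.counter xs).keys.map (fun k => ((xs.count k / 2 : Nat) : Int)) := by
    apply List.map_congr_left; intro k _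
    simp only [Function.comp, hgetD]
    exact_mod_cast PySem.Int.floordiv_natCast (xs.count k) 2
  rw [hmapeq]
  have hlenS : (xs.foldl pvToggle ([] : PySem.Set Int)).length = (pvOddList xs).length :=
    (fold_toggle_perm xs).length_eq
  have hlenN : PySem.Set.len (xs.foldl pvToggle PySem.Set.empty)
      = ((pvOddList xs).length : Int) := by
    simp [PySem.Set.len, hlenS]
  rw [hlenN]
  -- now pure arithmetic over the key list D
  set D := (PySem.Dict.counter xs).keys with hD
  have hndD : D.Nodup := PySem.Dict.nodup_keys_counter xs
  have hmemD : ∀ v, v ∈ D ↔ v ∈ xs := by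
    intro v; rw [hkeys, PySem.Set.mem_ofList]
  have hsum : (D.map (fun k => xs.count k)).sum = xs.length :=
    sum_count_over_nodup xs D hndD hmemD
  -- |pvOddList xs| = countP over dedup = Σ over D of count%2
  have hodd : (pvOddList xs).length = (D.map (fun k => xs.count k % 2)).sum := by
    unfold pvOddList
    rw [← List.countP_eq_length_filter, sum_mod_two_eq_countP D (fun k => xs.count k)]
    have hperm : (PySem.List.dedup xs).Perm D := by
      rw [List.perm_ext_iff_of_nodup
        (by rw [PySem.List.dedup_eq_ofList]; exact PySem.Set.nodup_ofList xs) hndD]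
      intro a
      rw [PySem.List.dedup_eq_ofList, PySem.Set.mem_ofList, hmemD]
    exact hperm.countP_eq _
  -- split each count into 2*(c/2) + c%2
  have hsplit : (D.map (fun k => xs.count k)).sum
      = 2 * (D.map (fun k => xs.count k / 2)).sum + (D.map (fun k => xs.count k % 2)).sum := by
    induction D with
    | nil => rfl
    | cons x t ih => simp [List.map_cons, List.sum_cons] at ih ⊢; omega
  -- convert the Int map-sum over D to a cast of the Nat sum
  have hcast : ((D.map (fun k => ((xs.count k / 2 : Nat) : Int))).sum)
      = ((D.map (fun k => xs.count k / 2)).sum : Int) := by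
    induction D with
    | nil => rfl
    | cons x t ih => simp [List.map_cons, List.sum_cons] at ih ⊢; omega
  rw [hcast]
  have h2 : PySem.Int.floordiv (((pvOddList xs).length : Nat) : Int) 2
      = (((pvOddList xs).length / 2 : Nat) : Int) :=
    PySem.Int.floordiv_natCast _ 2
  rw [h2]
  -- final omega over Nat facts
  have e1 := hsum
  have e2 := hsplit
  have e3 := hodd
  have e4 := hlen2
  omega

-- ===== VERDICT (by name: the statement is the Claim_ definition above) =====
theorem solution_spec : Claim_equal_solution := by
  intro boxes _
  unfold Spec_solution
  exact main_identity boxes
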